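-- pv_equiv track=rewrite | github.com/Giouw1/IC | checador.py | le_caminho
-- ===== SOURCE A (Python) =====
-- def le_caminho(texto):
--     caminhos = []
--     for line in texto:
--         if line[0] == "s":break
--         if line[0] == "x":
--             caminho_at=-1
--             for i in range(len(line)):
--                 if line[i] == "_":
--                     for j in range(i+1,len(line)):
--                         if line[j] == "_" or line[j] == " ":
--                             if caminho_at == -1:
--                                 caminho_at = int(line[i+1:j])-1
--                                 break
--                             else: caminhos[caminho_at] += [int(line[i+1:j])];break
--         else:
--             caminhos += [[]]
--     return caminhos
-- ===== SOURCE B (Python) =====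
-- def le_caminho(texto):
--     caminhos = []
--     for line in texto:
--         if line[0] == "s":
--             break
--         if line[0] != "x":
--             caminhos.append([])
--             continue
--         caminho_at = -1
--         start = None  # position right after an opening '_', if a token is open
--         for idx, ch in enumerate(line):
--             if start is not None and (ch == "_" or ch == " "):
--                 n = int(line[start:idx])
--                 if caminho_at == -1:
--                     caminho_at = n - 1
--                 else:
--                     caminhos[caminho_at].append(n)
--                 start = idx + 1 if ch == "_" else None
--             elif ch == "_":
--                 start = idx + 1
--     return caminhos
-- ===== Notes on version B (the rewrite author's own statement) =====
-- stated objective: alternative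
-- what changed: A rescans the rest of the line from every underscore (nested character loops); B makes one linear left-to-right scan per line, tracking the open token's start position and emitting each token once.
-- outside the precondition, e.g. on le_caminho(['']): A raises IndexError, B raises IndexError; on le_caminho(['x_a_']): A raises ValueError, B raises ValueError; on le_caminho(['x_5_1_']): A raises IndexError, B raises IndexError
import Mathlib
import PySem

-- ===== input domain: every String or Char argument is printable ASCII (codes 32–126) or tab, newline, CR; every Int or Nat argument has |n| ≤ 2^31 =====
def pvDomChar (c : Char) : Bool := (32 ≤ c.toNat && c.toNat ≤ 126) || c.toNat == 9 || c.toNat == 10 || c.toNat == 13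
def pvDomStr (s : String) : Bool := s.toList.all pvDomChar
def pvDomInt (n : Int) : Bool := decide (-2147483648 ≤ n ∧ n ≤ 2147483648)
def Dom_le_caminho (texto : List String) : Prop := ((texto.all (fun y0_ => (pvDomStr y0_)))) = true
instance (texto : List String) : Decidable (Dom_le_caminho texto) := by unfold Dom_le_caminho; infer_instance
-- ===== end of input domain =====

-- B replaces A's nested per-underscore rescanning with one linear left-to-right token scan per line
-- (same return value; A and B only touch a local list, neither mutates the argument).

-- Shared token-processing step, identical in both Pythons: parse the token, first nonzero-delta
-- token selects the target path, later tokens are appended there.  `int(...)` is totalized with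
-- getD 0 and the index with a no-op; Pre_ excludes inputs where Python would raise (ValueError /
-- IndexError), so this default is never reached under Pre_.
def pvAppendAt (xs : List (List Int)) (i : Int) (n : Int) : List (List Int) :=
  match PySem.List.pyGet? xs i with
  | some l => PySem.List.pySetD xs i (l ++ [n])   -- caminhos[caminho_at] += [n] (negative index from back)
  | none => xs
def pvStep (st : List (List Int) × Int) (tok : List Char) : List (List Int) × Int :=
  let n := (PySem.Int.ofChars? tok).getD 0
  if st.2 = -1 then (st.1, n - 1) else (pvAppendAt st.1 st.2 n, st.2)

-- ===== PORT A =====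
-- inner `for j in range(i+1, len(line))`: find the first '_' or ' ' after i, process line[i+1:j], break.
-- (cs.drop (i+1)).take (j-(i+1)) = line[i+1:j] exactly (0 ≤ i+1 ≤ j).
def leA_find (cs : List Char) (i j : Nat) (st : List (List Int) × Int) : List (List Int) × Int :=
  if h : j < cs.length then
    if cs[j] = '_' ∨ cs[j] = ' ' then pvStep st ((cs.drop (i+1)).take (j - (i+1)))
    else leA_find cs i (j+1) st
  else st
termination_by cs.length - j

-- outer `for i in range(len(line))`
def leA_outer (cs : List Char) (i : Nat) (st : List (List Int) × Int) : List (List Int) × Int :=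
  if h : i < cs.length then
    if cs[i] = '_' then leA_outer cs (i+1) (leA_find cs i (i+1) st)
    else leA_outer cs (i+1) st
  else st
termination_by cs.length - i

def le_caminho_go (texto : List String) (caminhos : List (List Int)) : List (List Int) :=
  match texto with
  | [] => caminhos
  | line :: rest =>
    match PySem.Str.pyGet? line 0 with          -- line[0]; none = IndexError, excluded by Pre_
    | none => caminhos
    | some c =>
      if c = 's' then caminhos                                            -- break
      else if c = 'x' then le_caminho_go rest (leA_outer line.toList 0 (caminhos, -1)).1
      else le_caminho_go rest (caminhos ++ [[]])

def le_caminho (texto : List String) : List (List Int) := le_caminho_go texto []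

-- ===== PORT B =====
-- one linear scan; start = position right after an opening '_', if a token is open
def leB_scan (cs : List Char) (idx : Nat) (start : Option Nat) (st : List (List Int) × Int) :
    List (List Int) × Int :=
  if h : idx < cs.length then
    match start with
    | some s =>
      if cs[idx] = '_' then leB_scan cs (idx+1) (some (idx+1)) (pvStep st ((cs.drop s).take (idx - s)))
      else if cs[idx] = ' ' then leB_scan cs (idx+1) none (pvStep st ((cs.drop s).take (idx - s)))
      else leB_scan cs (idx+1) (some s) st
    | none =>
      if cs[idx] = '_' then leB_scan cs (idx+1) (some (idx+1)) st
      else leB_scan cs (idx+1) none st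
  else st
termination_by cs.length - idx

def le_caminho_alt_go (texto : List String) (caminhos : List (List Int)) : List (List Int) :=
  match texto with
  | [] => caminhos
  | line :: rest =>
    match PySem.Str.pyGet? line 0 with
    | none => caminhos
    | some c =>
      if c = 's' then caminhos
      else if c = 'x' then le_caminho_alt_go rest (leB_scan line.toList 0 none (caminhos, -1)).1
      else le_caminho_alt_go rest (caminhos ++ [[]])

def le_caminho_alt (texto : List String) : List (List Int) := le_caminho_alt_go texto []

-- ===== PRECONDITION & SPEC =====
-- tokenizer used only by Pre_: the substrings strictly between a '_' on the left and the first
-- '_' or ' ' to its right (structural recursion so that `decide` evaluates Pre_ on literals)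
def pvToks (cs : List Char) (open_ : Option (List Char)) : List (List Char) :=
  match cs, open_ with
  | [], _ => []
  | c :: rest, some acc =>
    if c = '_' then acc :: pvToks rest (some [])
    else if c = ' ' then acc :: pvToks rest none
    else pvToks rest (some (acc ++ [c]))
  | c :: rest, none => if c = '_' then pvToks rest (some []) else pvToks rest none

-- one x-line is safe with L paths already present: every token parses as an int, and when a token
-- is actually appended the selected index is in range (Python semantics: negative = from the back)
def pvLineOK (cs : List Char) (L : Nat) : Bool :=
  (pvToks cs none).all (fun t => (PySem.Int.ofChars? t).isSome) &&
  (match ((pvToks cs none).map (fun t => (PySem.Int.ofChars? t).getD 0)).dropWhile (· = 0) with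
   | [] => true
   | _ :: [] => true
   | m :: _ :: _ => decide (PySem.Raise.InRange L (m - 1)))

def pvPreGo (texto : List String) (L : Nat) : Bool :=
  match texto with
  | [] => true
  | line :: rest =>
    match line.toList with
    | [] => false                                   -- line[0] raises IndexError
    | c :: _ =>
      if c = 's' then true
      else if c = 'x' then pvLineOK line.toList L && pvPreGo rest L
      else pvPreGo rest (L+1)

-- Pre_ excludes exactly the inputs on which the Python A raises: an empty line reached before the
-- break (IndexError), an x-line with a token int() rejects (ValueError), or an x-line whose
-- selected path index is out of range when a number is appended (IndexError).
def Pre_le_caminho (texto : List String) : Prop := pvPreGo texto 0 = true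
instance (texto : List String) : Decidable (Pre_le_caminho texto) := by
  unfold Pre_le_caminho; infer_instance

def pvWitness_le_caminho : List String := ["abc", "x_1_5_", "stop"]

def Spec_le_caminho (texto : List String) (out : List (List Int)) : Prop := out = le_caminho_alt texto
instance (texto : List String) (out : List (List Int)) : Decidable (Spec_le_caminho texto out) := by
  unfold Spec_le_caminho; infer_instance

-- ===== CLAIM (what is proved, stated in full; the proofs are below) =====
def Claim_equal_le_caminho : Prop := ∀ (texto : List String), Dom_le_caminho texto → Pre_le_caminho texto → Spec_le_caminho texto (le_caminho texto)

-- ===== LEMMAS AND PROOFS =====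

-- index-based tokenizer mirroring A's scan, used by the proofs below to characterize both loops
def pvFindTerm (cs : List Char) (j : Nat) : Option Nat :=
  if h : j < cs.length then
    if cs[j] = '_' ∨ cs[j] = ' ' then some j else pvFindTerm cs (j+1)
  else none
termination_by cs.length - j

def pvTokensFrom (cs : List Char) (i : Nat) : List (List Char) :=
  if h : i < cs.length then
    if cs[i] = '_' then
      (match pvFindTerm cs (i+1) with
       | some j => [(cs.drop (i+1)).take (j - (i+1))]
       | none => []) ++ pvTokensFrom cs (i+1)
    else pvTokensFrom cs (i+1)
  else []
termination_by cs.length - i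

-- A's inner loop processes the token ending at the first terminator, if any
theorem leA_find_eq (cs : List Char) (i : Nat) : ∀ j st, leA_find cs i j st =
    match pvFindTerm cs j with
    | some t => pvStep st ((cs.drop (i+1)).take (t - (i+1)))
    | none => st := by
  intro j st
  induction j using leA_find.induct (cs := cs) with
  | case1 j h hterm => rw [leA_find, pvFindTerm]; simp [h, hterm]
  | case2 j h hterm ih => rw [leA_find, pvFindTerm]; simp [h, hterm]; exact ih
  | case3 j h => rw [leA_find, pvFindTerm]; simp [h]

-- if no terminator remains, no token remains
theorem pvTokensFrom_of_findTerm_none (cs : List Char) : ∀ a, pvFindTerm cs a = none →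
    pvTokensFrom cs a = [] := by
  intro a
  induction a using pvFindTerm.induct (cs := cs) with
  | case1 a h hterm => intro hn; rw [pvFindTerm] at hn; simp [h, hterm] at hn
  | case2 a h hterm ih =>
    intro hn; rw [pvFindTerm] at hn; simp [h, hterm] at hn
    rw [pvTokensFrom]
    have hu : ¬ cs[a] = '_' := fun e => hterm (Or.inl e)
    simp [h, hu]
    exact ih hn
  | case3 a h => intro _; rw [pvTokensFrom]; simp [h]

-- skipping characters that are not terminators does not change the token list
theorem pvTokensFrom_skip (cs : List Char) : ∀ a b, pvFindTerm cs a = some b →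
    pvTokensFrom cs a = pvTokensFrom cs b := by
  intro a
  induction a using pvFindTerm.induct (cs := cs) with
  | case1 a h hterm =>
    intro b hf; rw [pvFindTerm] at hf; simp [h, hterm] at hf; rw [hf]
  | case2 a h hterm ih =>
    intro b hf; rw [pvFindTerm] at hf; simp [h, hterm] at hf
    have hu : ¬ cs[a] = '_' := fun e => hterm (Or.inl e)
    rw [pvTokensFrom]; simp [h, hu]
    exact ih b hf
  | case3 a h => intro b hf; rw [pvFindTerm] at hf; simp [h] at hf

-- A's per-line loop is the fold of pvStep over the token list
theorem leA_outer_eq (cs : List Char) : ∀ i st,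
    leA_outer cs i st = List.foldl pvStep st (pvTokensFrom cs i) := by
  intro i st
  induction i, st using leA_outer.induct (cs := cs) with
  | case1 i st h hu ih =>
    rw [leA_outer, pvTokensFrom]; simp [h, hu]
    rw [ih, leA_find_eq]
    cases hf : pvFindTerm cs (i+1) with
    | some j => simp [hf]
    | none => simp [hf]
  | case2 i st h hu ih => rw [leA_outer, pvTokensFrom]; simp [h, hu]; exact ih
  | case3 i st h => rw [leA_outer, pvTokensFrom]; simp [h]

-- B's per-line scan is the same fold
theorem leB_scan_eq (cs : List Char) : ∀ idx start st, leB_scan cs idx start st =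
    match start with
    | none => List.foldl pvStep st (pvTokensFrom cs idx)
    | some s =>
      match pvFindTerm cs idx with
      | some j => List.foldl pvStep (pvStep st ((cs.drop s).take (j - s))) (pvTokensFrom cs j)
      | none => st := by
  intro idx start st
  induction idx, start, st using leB_scan.induct (cs := cs) with
  | case1 idx st h s hu ih =>
    -- open token, '_' seen: emit and reopen
    rw [leB_scan]; simp [h, hu]
    rw [ih]; dsimp only
    have hidx : pvFindTerm cs idx = some idx := by rw [pvFindTerm]; simp [h, hu]
    have htok : pvTokensFrom cs idx =
        (match pvFindTerm cs (idx+1) with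
         | some j => [(cs.drop (idx+1)).take (j - (idx+1))]
         | none => []) ++ pvTokensFrom cs (idx+1) := by
      rw [pvTokensFrom]; simp [h, hu]
    rw [hidx]; dsimp only
    rw [htok]
    cases hf : pvFindTerm cs (idx+1) with
    | some j => rw [pvTokensFrom_skip cs (idx+1) j hf]; simp
    | none => rw [pvTokensFrom_of_findTerm_none cs (idx+1) hf]; simp
  | case2 idx st h s hu hsp ih =>
    -- open token, ' ' seen: emit and close
    rw [leB_scan]; simp [h, hu, hsp]
    rw [ih]; dsimp only
    have hidx : pvFindTerm cs idx = some idx := by rw [pvFindTerm]; simp [h, hsp]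
    have htok : pvTokensFrom cs idx = pvTokensFrom cs (idx+1) := by
      rw [pvTokensFrom]; simp [h, hu]
    rw [hidx]; dsimp only
    rw [htok]
  | case3 idx st h s hu hsp ih =>
    -- open token, ordinary character
    rw [leB_scan]; simp [h, hu, hsp]
    rw [ih]; dsimp only
    have hidx : pvFindTerm cs idx = pvFindTerm cs (idx+1) := by
      rw [pvFindTerm]; simp [h, hu, hsp]
    rw [hidx]
  | case4 idx st h hu ih =>
    -- no open token, '_' seen: open one
    rw [leB_scan]; simp [h, hu]
    rw [ih]; dsimp only
    have htok : pvTokensFrom cs idx =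
        (match pvFindTerm cs (idx+1) with
         | some j => [(cs.drop (idx+1)).take (j - (idx+1))]
         | none => []) ++ pvTokensFrom cs (idx+1) := by
      rw [pvTokensFrom]; simp [h, hu]
    rw [htok]
    cases hf : pvFindTerm cs (idx+1) with
    | some j => rw [pvTokensFrom_skip cs (idx+1) j hf]; simp
    | none => rw [pvTokensFrom_of_findTerm_none cs (idx+1) hf]; simp
  | case5 idx st h hu ih =>
    -- no open token, ordinary character
    rw [leB_scan]; simp [h, hu]
    rw [ih]; dsimp only
    have htok : pvTokensFrom cs idx = pvTokensFrom cs (idx+1) := by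
      rw [pvTokensFrom]; simp [h, hu]
    rw [htok]
  | case6 idx start st h =>
    rw [leB_scan]
    cases start with
    | none => rw [pvTokensFrom]; simp [h]
    | some s => rw [pvFindTerm]; simp [h]

theorem go_eq (texto : List String) : ∀ acc, le_caminho_go texto acc = le_caminho_alt_go texto acc := by
  induction texto with
  | nil => intro acc; rfl
  | cons line rest ih =>
    intro acc
    rw [le_caminho_go, le_caminho_alt_go]
    cases hc : PySem.Str.pyGet? line 0 with
    | none => rfl
    | some c =>
      simp only []
      by_cases hs : c = 's'
      · simp [hs]
      · by_cases hx : c = 'x'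
        · simp [hs, hx]
          rw [leA_outer_eq, leB_scan_eq line.toList 0 none]
          exact ih _
        · simp [hs, hx]; exact ih _

-- ===== VERDICT (by name: the statement is the Claim_ definition above) =====
theorem le_caminho_spec : Claim_equal_le_caminho := by
  intro texto _ _
  unfold Spec_le_caminho le_caminho le_caminho_alt
  exact go_eq texto []
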